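-- pv_equiv track=rewrite | github.com/fygar256/axx | axx.py | replace_percent_with_index
-- ===== SOURCE A (Python) =====
-- def replace_percent_with_index(s):
--     """Replace %% with sequential numbers starting from 0"""
--     count = 0
--     result = []
--     i = 0
--     while i < len(s):
--         if i + 1 < len(s) and s[i:i+2] == '%%':
--             result.append(str(count))
--             count += 1
--             i += 2
--         elif i+1<len(s) and s[i:i+2] == "%0":
--             count = 0
--             i += 2
--         else:
--             result.append(s[i])
--             i += 1
--     return ''.join(result)
-- ===== SOURCE B (Python) =====
-- def replace_percent_with_index(s):
--     """Replace %% with sequential numbers starting from 0"""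
--     out = []
--     count = 0
--     pending = False  # saw a '%' whose partner is undecided
--     for ch in s:
--         if pending:
--             if ch == '%':
--                 out.append(str(count))
--                 count += 1
--             elif ch == '0':
--                 count = 0
--             else:
--                 out.append('%')
--                 out.append(ch)
--             pending = False
--         elif ch == '%':
--             pending = True
--         else:
--             out.append(ch)
--     if pending:
--         out.append('%')
--     return ''.join(out)
-- ===== Notes on version B (the rewrite author's own statement) =====
-- stated objective: faster
-- what changed: Replaced the index-and-slice scanner (a fresh two-char slice s[i:i+2] allocated and compared at every position, manual i += 1/2) by a one-pass character automaton: a fold over the characters with a pending-percent state, no indexing or slicing.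
import Mathlib
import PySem

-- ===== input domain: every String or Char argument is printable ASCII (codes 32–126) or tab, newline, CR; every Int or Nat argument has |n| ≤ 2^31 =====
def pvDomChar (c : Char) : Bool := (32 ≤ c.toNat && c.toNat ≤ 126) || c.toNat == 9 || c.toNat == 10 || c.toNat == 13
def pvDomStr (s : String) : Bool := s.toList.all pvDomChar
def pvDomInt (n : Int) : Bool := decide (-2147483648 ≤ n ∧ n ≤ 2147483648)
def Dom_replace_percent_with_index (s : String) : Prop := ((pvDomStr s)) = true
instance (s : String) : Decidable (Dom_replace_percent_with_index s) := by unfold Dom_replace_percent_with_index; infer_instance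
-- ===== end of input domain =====

-- B replaces A's index-and-slice lookahead scan by a one-pass pending-'%' automaton, avoiding the per-position slice allocation.

-- ===== PORT A =====
-- A's while loop over index i: at each position it looks at the two-char slice.
-- Ported as recursion on the remaining character list (c1 :: c2 :: rest ↔ i+1 < len s),
-- carrying count and the accumulated list of strings (result).
def goA : Int → List String → List Char → List String
  | _, acc, [] => acc
  | _, acc, [c] => acc ++ [c.toString]          -- i+1 = len: both slice tests fail, else-branch
  | count, acc, c1 :: c2 :: rest =>
    if c1 = '%' ∧ c2 = '%' then goA (count + 1) (acc ++ [PySem.Int.toStr count]) rest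
    else if c1 = '%' ∧ c2 = '0' then goA 0 acc rest
    else goA count (acc ++ [c1.toString]) (c2 :: rest)
termination_by _ _ l => l.length
decreasing_by all_goals simp

def replace_percent_with_index (s : String) : String :=
  String.join (goA 0 [] s.toList)

-- ===== PORT B =====
-- one automaton step of Source B's for-loop body; state = (count, pending, out)
def stepB (st : Int × Bool × List String) (ch : Char) : Int × Bool × List String :=
  match st with
  | (count, pending, out) =>
    if pending then
      if ch = '%' then (count + 1, false, out ++ [PySem.Int.toStr count])
      else if ch = '0' then (0, false, out)
      else (count, false, out ++ ["%", ch.toString])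
    else if ch = '%' then (count, true, out)
    else (count, false, out ++ [ch.toString])

-- Source B's trailing 'if pending: out.append('%')'
def finishB : Int × Bool × List String → List String
  | (_, pending, out) => if pending then out ++ ["%"] else out

def replace_percent_with_index_alt (s : String) : String :=
  String.join (finishB (s.toList.foldl stepB (0, false, [])))

-- ===== PRECONDITION & SPEC =====
def Spec_replace_percent_with_index (s : String) (out : String) : Prop := out = replace_percent_with_index_alt s
instance (s : String) (out : String) : Decidable (Spec_replace_percent_with_index s out) := by unfold Spec_replace_percent_with_index; infer_instance

-- ===== CLAIM (what is proved, stated in full; the proofs are below) =====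
def Claim_equal_replace_percent_with_index : Prop := ∀ (s : String), Dom_replace_percent_with_index s → Spec_replace_percent_with_index s (replace_percent_with_index s)

-- ===== LEMMAS AND PROOFS =====

-- a non-'%' head is simply appended, whatever follows
lemma goA_lit (c : Char) (hc : ¬ c = '%') (count : Int) (acc : List String) (rest : List Char) :
    goA count acc (c :: rest) = goA count (acc ++ [c.toString]) rest := by
  cases rest with
  | nil => simp [goA]
  | cons r rs => simp [goA, hc]

lemma key (n : Nat) : ∀ (l : List Char), l.length ≤ n → ∀ (count : Int) (acc : List String),
    goA count acc l = finishB (l.foldl stepB (count, false, acc)) := by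
  induction n with
  | zero =>
    intro l hl count acc
    have : l = [] := List.eq_nil_of_length_eq_zero (Nat.le_zero.mp hl)
    subst this; simp [goA, finishB]
  | succ n ih =>
    intro l hl count acc
    match l with
    | [] => simp [goA, finishB]
    | [c] =>
      by_cases hc : c = '%'
      · subst hc; simp [goA, stepB, finishB]; rfl
      · simp [goA, stepB, finishB, hc]
    | c1 :: c2 :: rest =>
      have hr : rest.length ≤ n := by simp at hl; omega
      by_cases h1 : c1 = '%'
      · subst h1
        by_cases h2 : c2 = '%'
        · subst h2
          rw [show goA count acc ('%' :: '%' :: rest)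
                = goA (count + 1) (acc ++ [PySem.Int.toStr count]) rest by simp [goA]]
          simp only [List.foldl, stepB, if_true]
          rw [ih rest hr]
          simp [stepB]
        · by_cases h3 : c2 = '0'
          · subst h3
            rw [show goA count acc ('%' :: '0' :: rest) = goA 0 acc rest by simp [goA]]
            rw [ih rest hr]
            simp [stepB]
          · rw [show goA count acc ('%' :: c2 :: rest)
                  = goA count (acc ++ ['%'.toString]) (c2 :: rest) by simp [goA, h2, h3]]
            rw [goA_lit c2 h2, ih rest hr]
            simp [stepB, h2, h3]
            rfl
      · rw [goA_lit c1 h1]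
        have hc2 : (c2 :: rest).length ≤ n := by simp at hl ⊢; omega
        rw [ih (c2 :: rest) hc2]
        simp [stepB, h1]

-- ===== VERDICT (by name: the statement is the Claim_ definition above) =====
theorem replace_percent_with_index_spec : Claim_equal_replace_percent_with_index := by
  intro s _
  unfold Spec_replace_percent_with_index replace_percent_with_index replace_percent_with_index_alt
  rw [key s.toList.length s.toList (le_refl _)]
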